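-- pv_equiv track=rewrite | github.com/Starlegen100810/StarLegenBot | project_root/src/core/pu/pu40_gamification_levels.py | level_for_points
-- ===== SOURCE A (Python) =====
-- LEVELS = [
--     (0, "Bronze"),
--     (100, "Silver"),
--     (500, "Gold"),
--     (1500, "Platinum"),
-- ]
--
-- def level_for_points(points: int) -> str:
--     lvl = "Bronze"
--     for threshold, name in LEVELS:
--         if points >= threshold:
--             lvl = name
--         else:
--             break
--     return lvl
-- ===== SOURCE B (Python) =====
-- def level_for_points(points: int) -> str:
--     if points >= 1500:
--         return "Platinum"
--     if points >= 500:
--         return "Gold"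
--     if points >= 100:
--         return "Silver"
--     return "Bronze"
-- ===== Notes on version B (the rewrite author's own statement) =====
-- stated objective: simpler
-- what changed: Replaced the loop over the ascending LEVELS list (accumulator + break) with a direct highest-first conditional chain returning immediately.
import Mathlib
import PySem

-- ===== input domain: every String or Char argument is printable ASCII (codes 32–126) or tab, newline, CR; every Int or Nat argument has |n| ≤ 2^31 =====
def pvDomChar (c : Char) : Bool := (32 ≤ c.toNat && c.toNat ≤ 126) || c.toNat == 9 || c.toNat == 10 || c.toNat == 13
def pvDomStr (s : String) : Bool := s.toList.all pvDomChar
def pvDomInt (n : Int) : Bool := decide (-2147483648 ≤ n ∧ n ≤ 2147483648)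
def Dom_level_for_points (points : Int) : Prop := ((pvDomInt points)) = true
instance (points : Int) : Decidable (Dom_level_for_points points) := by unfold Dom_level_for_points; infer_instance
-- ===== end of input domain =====

-- B replaces A's loop over the ascending LEVELS table with a direct highest-first conditional chain (simpler).

-- ===== PORT A =====
def LEVELS : List (Int × String) :=
  [(0, "Bronze"), (100, "Silver"), (500, "Gold"), (1500, "Platinum")]

-- the for-loop with break: recurse over the table carrying lvl
def levelLoop (points : Int) (lvl : String) : List (Int × String) → String
  | [] => lvl
  | (threshold, name) :: rest =>
      if points ≥ threshold then levelLoop points name rest else lvl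

def level_for_points (points : Int) : String :=
  levelLoop points "Bronze" LEVELS

-- ===== PORT B =====
def level_for_points_alt (points : Int) : String :=
  if points ≥ 1500 then "Platinum"
  else if points ≥ 500 then "Gold"
  else if points ≥ 100 then "Silver"
  else "Bronze"

-- ===== PRECONDITION & SPEC =====
def Spec_level_for_points (points : Int) (out : String) : Prop := out = level_for_points_alt points
instance (points : Int) (out : String) : Decidable (Spec_level_for_points points out) := by unfold Spec_level_for_points; infer_instance

-- ===== CLAIM =====
def Claim_equal_level_for_points : Prop := ∀ (points : Int), Dom_level_for_points points → Spec_level_for_points points (level_for_points points)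

-- ===== LEMMAS AND PROOFS =====

-- ===== VERDICT =====
theorem level_for_points_spec : Claim_equal_level_for_points := by
  intro points _
  unfold Spec_level_for_points level_for_points level_for_points_alt LEVELS levelLoop
  by_cases h0 : points ≥ 0 <;> by_cases h1 : points ≥ 100 <;>
    by_cases h2 : points ≥ 500 <;> by_cases h3 : points ≥ 1500 <;>
    simp [levelLoop, h0, h1, h2, h3] <;> omega
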